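-- pv_equiv track=rewrite | github.com/nachai-l/cv-generator | functions/utils/common.py | strip_redundant_section_heading
-- ===== SOURCE A (Python) =====
-- def strip_redundant_section_heading(
--     raw_text: str,
--     section_id: str,
--     removal_map: dict[str, str] | None = None,
-- ) -> str:
--     """
--     Remove a meaningless first line that repeats the section heading.
--     Keeps all bullets except when the whole line is just the heading itself.
--     """
--
--     # Safe default map (no mutable default argument)
--     if removal_map is None:
--         removal_map = {
--             "references": "references",
--             "additional_info": "additional information",
--         }
--
--     if not raw_text:
--         return raw_text
--
--     # Determine if this section has a redundant title to remove
--     title = removal_map.get(section_id)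
--     if not title:
--         return raw_text
--
--     lines = raw_text.splitlines()
--     if not lines:
--         return raw_text
--
--     cleaned: list[str] = []
--     first_nonempty_seen = False
--
--     for ln in lines:
--         stripped = ln.strip()
--
--         # Skip leading empty lines before real content
--         if not stripped and not first_nonempty_seen:
--             continue
--
--         if not first_nonempty_seen:
--             first_nonempty_seen = True
--
--             # Normalize for comparison (do NOT modify original text)
--             core = (
--                 stripped
--                 .lstrip("-•* ")   # strip bullets only for checking
--                 .rstrip(":")
--                 .strip()
--                 .lower()
--             )
--
--             # If this line is just the heading → remove it
--             if core == title.lower():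
--                 continue
--
--         cleaned.append(ln)  # keep original line
--
--     return "\n".join(cleaned).strip()
-- ===== SOURCE B (Python) =====
-- def strip_redundant_section_heading(
--     raw_text: str,
--     section_id: str,
--     removal_map: dict[str, str] | None = None,
-- ) -> str:
--     """Remove a first line that merely repeats the section heading."""
--     if removal_map is None:
--         removal_map = {
--             "references": "references",
--             "additional_info": "additional information",
--         }
--     if not raw_text:
--         return raw_text
--     title = removal_map.get(section_id)
--     if not title:
--         return raw_text
--     lines = raw_text.splitlines()
--     if not lines:
--         return raw_text
--     # Locate the first non-blank line instead of filtering with a seen-flag.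
--     i = 0
--     while i < len(lines) and not lines[i].strip():
--         i += 1
--     body = lines[i:]
--     if body:
--         core = body[0].strip().lstrip("-•* ").rstrip(":").strip().lower()
--         if core == title.lower():
--             body = body[1:]
--     return "\n".join(body).strip()
-- ===== Notes on version B (the rewrite author's own statement) =====
-- stated objective: simpler
-- what changed: Replaces A's single-pass accumulator with a first_nonempty_seen flag by a locate-then-remove shape: skip leading blank lines, test just the first remaining line against the title, and drop it by slicing; the trailing strip makes keeping/dropping the leading blanks equivalent.
import Mathlib
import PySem

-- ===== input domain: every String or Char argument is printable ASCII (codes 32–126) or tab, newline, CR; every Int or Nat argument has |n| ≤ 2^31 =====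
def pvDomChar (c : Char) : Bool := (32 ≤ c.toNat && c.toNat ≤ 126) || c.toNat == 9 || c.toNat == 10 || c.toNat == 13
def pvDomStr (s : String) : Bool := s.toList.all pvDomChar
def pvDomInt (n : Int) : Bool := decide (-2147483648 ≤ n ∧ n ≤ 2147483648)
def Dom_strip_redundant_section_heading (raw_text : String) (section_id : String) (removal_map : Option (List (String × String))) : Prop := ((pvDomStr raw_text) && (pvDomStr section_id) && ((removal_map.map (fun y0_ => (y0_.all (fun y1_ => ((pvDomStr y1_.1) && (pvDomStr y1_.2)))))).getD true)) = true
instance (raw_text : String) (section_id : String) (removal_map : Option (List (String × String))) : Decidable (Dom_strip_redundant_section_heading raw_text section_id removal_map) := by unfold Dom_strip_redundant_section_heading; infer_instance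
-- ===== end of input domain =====

-- B replaces A's seen-flag accumulator pass by a locate-then-remove shape (skip blanks, test one line, slice); objective: simpler.

-- shared helpers: Python's str.lstrip(chars)/str.rstrip(chars) (exact: drop chars of the set from one end)
def pvLstripChars (cs : List Char) (chars : List Char) : List Char := cs.dropWhile (· ∈ chars)
def pvRstripChars (cs : List Char) (chars : List Char) : List Char := (cs.reverse.dropWhile (· ∈ chars)).reverse
-- stripped.lstrip("-•* ").rstrip(":").strip().lower()  (applied to an already-stripped line in both programs)
def pvNorm (stripped : List Char) : List Char :=
  PySem.Chars.lower (PySem.Chars.strip (pvRstripChars (pvLstripChars stripped ['-', '•', '*', ' ']) [':']))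
def pvDefaultMap : List (String × String) :=
  [("references", "references"), ("additional_info", "additional information")]

-- ===== PORT A =====
-- A's loop body: state = (first_nonempty_seen, cleaned)
def pvStepA (title : List Char) (st : Bool × List (List Char)) (ln : List Char) : Bool × List (List Char) :=
  let stripped := PySem.Chars.strip ln
  if stripped = [] ∧ st.1 = false then st
  else if st.1 = false then
    if pvNorm stripped = PySem.Chars.lower title then (true, st.2)
    else (true, st.2 ++ [ln])
  else (st.1, st.2 ++ [ln])

def strip_redundant_section_heading (raw_text : String) (section_id : String) (removal_map : Option (List (String × String))) : String :=
  let rm := match removal_map with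
    | some m => m
    | none => pvDefaultMap
  if raw_text = "" then raw_text
  else
    match (PySem.Dict.ofList rm).get? section_id with
    | none => raw_text
    | some title =>
      if title = "" then raw_text
      else
        let lines := PySem.Chars.splitlines raw_text.toList
        if lines = [] then raw_text
        else
          let res := lines.foldl (pvStepA title.toList) (false, [])
          String.ofList (PySem.Chars.strip (PySem.Chars.join ['\n'] res.2))

-- ===== PORT B =====
-- B's while loop: drop leading lines whose strip() is empty
def pvDropBlank : List (List Char) → List (List Char)
  | [] => []
  | ln :: rest => if PySem.Chars.strip ln = [] then pvDropBlank rest else ln :: rest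

def strip_redundant_section_heading_alt (raw_text : String) (section_id : String) (removal_map : Option (List (String × String))) : String :=
  let rm := match removal_map with
    | some m => m
    | none => pvDefaultMap
  if raw_text = "" then raw_text
  else
    match (PySem.Dict.ofList rm).get? section_id with
    | none => raw_text
    | some title =>
      if title = "" then raw_text
      else
        let lines := PySem.Chars.splitlines raw_text.toList
        if lines = [] then raw_text
        else
          let body := pvDropBlank lines
          let body2 := match body with
            | [] => ([] : List (List Char))
            | first :: rest =>
              if pvNorm (PySem.Chars.strip first) = PySem.Chars.lower title.toList then rest
              else first :: rest
          String.ofList (PySem.Chars.strip (PySem.Chars.join ['\n'] body2))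

-- ===== PRECONDITION & SPEC =====
def Spec_strip_redundant_section_heading (raw_text : String) (section_id : String) (removal_map : Option (List (String × String))) (out : String) : Prop := out = strip_redundant_section_heading_alt raw_text section_id removal_map
instance (raw_text : String) (section_id : String) (removal_map : Option (List (String × String))) (out : String) : Decidable (Spec_strip_redundant_section_heading raw_text section_id removal_map out) := by unfold Spec_strip_redundant_section_heading; infer_instance

-- ===== CLAIM (what is proved, stated in full; the proofs are below) =====
def Claim_equal_strip_redundant_section_heading : Prop := ∀ (raw_text : String) (section_id : String) (removal_map : Option (List (String × String))), Dom_strip_redundant_section_heading raw_text section_id removal_map → Spec_strip_redundant_section_heading raw_text section_id removal_map (strip_redundant_section_heading raw_text section_id removal_map)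

-- ===== LEMMAS AND PROOFS =====

-- once the flag is set, A's loop just appends every remaining line
lemma foldA_true (t : List Char) (lines : List (List Char)) (acc : List (List Char)) :
    (lines.foldl (pvStepA t) (true, acc)).2 = acc ++ lines := by
  induction lines generalizing acc with
  | nil => simp
  | cons ln rest ih =>
    simp only [List.foldl_cons, pvStepA]
    simp [ih]

-- A's whole loop equals B's locate-then-remove computation
lemma foldA_eq (t : List Char) (lines : List (List Char)) :
    (lines.foldl (pvStepA t) (false, [])).2 =
      match pvDropBlank lines with
      | [] => []
      | f :: r => if pvNorm (PySem.Chars.strip f) = PySem.Chars.lower t then r else f :: r := by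
  induction lines with
  | nil => simp [pvDropBlank]
  | cons ln rest ih =>
    by_cases hb : PySem.Chars.strip ln = []
    · simpa [pvDropBlank, hb, pvStepA] using ih
    · by_cases hc : pvNorm (PySem.Chars.strip ln) = PySem.Chars.lower t
      · simp [pvDropBlank, hb, hc, pvStepA, foldA_true]
      · simp [pvDropBlank, hb, hc, pvStepA, foldA_true]

-- ===== VERDICT (by name: the statement is the Claim_ definition above) =====
theorem strip_redundant_section_heading_spec : Claim_equal_strip_redundant_section_heading := by
  intro raw_text section_id removal_map _
  unfold Spec_strip_redundant_section_heading
  unfold strip_redundant_section_heading strip_redundant_section_heading_alt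
  by_cases h1 : raw_text = ""
  · simp [h1]
  · simp only [h1, if_false]
    cases hget : (PySem.Dict.ofList (match removal_map with | some m => m | none => pvDefaultMap)).get? section_id with
    | none => rfl
    | some title =>
      by_cases h2 : title = ""
      · simp [h2]
      · simp only [h2, if_false]
        by_cases h3 : PySem.Chars.splitlines raw_text.toList = []
        · simp [h3]
        · simp only [h3, if_false]
          rw [foldA_eq]
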